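-- pv_equiv track=rewrite | github.com/siimveske/scratchpad | min_block.py | min_block
-- ===== SOURCE A (Python) =====
-- import math
--
-- def min_block(tekst):
--     if not tekst:
--         return 0
--
--     min_len = math.inf
--     current_char = tekst[0]
--     current_len = 1
--
--     for character in tekst[1:]:
--         if character == current_char:
--             current_len += 1
--         else:
--             if current_len < min_len:
--                 min_len = current_len
--             current_char = character
--             current_len = 1
--
--     if current_len < min_len:
--         min_len = current_len
--
--     return min_len  # type: ignore
-- ===== SOURCE B (Python) =====
-- def min_block(tekst):
--     n = len(tekst)
--     if n == 0:
--         return 0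
--     cuts = [0] + [i for i in range(1, n) if tekst[i] != tekst[i - 1]] + [n]
--     return min(b - a for a, b in zip(cuts, cuts[1:]))
-- ===== Notes on version B (the rewrite author's own statement) =====
-- stated objective: alternative
-- what changed: Instead of streaming a current_char/current_len/min_len state machine, B first computes the list of run-boundary indices (positions i with tekst[i] != tekst[i-1], plus 0 and n) by index comparison, then returns the minimum gap between consecutive boundaries via zip.
import Mathlib
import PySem

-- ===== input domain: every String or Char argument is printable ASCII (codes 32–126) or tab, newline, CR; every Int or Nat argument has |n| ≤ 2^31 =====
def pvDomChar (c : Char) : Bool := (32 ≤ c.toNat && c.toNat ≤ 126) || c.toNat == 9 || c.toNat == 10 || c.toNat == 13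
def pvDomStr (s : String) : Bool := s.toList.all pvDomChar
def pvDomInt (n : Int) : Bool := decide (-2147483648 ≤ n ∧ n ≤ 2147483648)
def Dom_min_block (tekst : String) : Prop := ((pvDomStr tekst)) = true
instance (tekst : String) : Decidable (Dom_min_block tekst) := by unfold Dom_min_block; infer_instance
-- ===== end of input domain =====

-- B finds run-boundary indices by comparing tekst[i] with tekst[i-1] and takes the minimum gap
-- between consecutive boundaries, instead of A's streaming current_char/current_len/min_len pass.


-- ===== PORT A =====
-- `current_len < min_len` where min_len starts as math.inf: none models inf, so comparison to none is true
def pvLtInf (n : Int) (m : Option Int) : Bool :=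
  match m with
  | none => true
  | some v => decide (n < v)

-- one iteration of A's for-loop over the state (min_len, current_char, current_len)
def pvStepA (s : Option Int × Char × Int) (c : Char) : Option Int × Char × Int :=
  if c = s.2.1 then (s.1, s.2.1, s.2.2 + 1)
  else ((if pvLtInf s.2.2 s.1 then some s.2.2 else s.1), c, 1)

-- A: empty guard, then tekst[0]/tekst[1:] as head/tail, the loop, and the final `if current_len < min_len`.
-- The `match … none` arm of the final min_len is unreachable (for nonempty input the final compare always yields a finite value).
def min_block (tekst : String) : Int :=
  match tekst.toList with
  | [] => 0
  | c :: rest =>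
    let s := List.foldl pvStepA (none, c, 1) rest
    match (if pvLtInf s.2.2 s.1 then some s.2.2 else s.1) with
    | some v => v
    | none => 0

-- ===== PORT B =====
-- B: cuts = [0] + [i for i in range(1, n) if tekst[i] != tekst[i-1]] + [n];
--    min(b - a for a, b in zip(cuts, cuts[1:])).  The match's [] arm is unreachable (cuts has ≥ 2 elements).
def min_block_alt (tekst : String) : Int :=
  let l := tekst.toList
  let n : Int := (l.length : Int)
  if n = 0 then 0
  else
    let cuts : List Int := 0 :: (((PySem.List.pyRange 1 n 1).filter
        (fun i => decide (PySem.List.pyGet? l i ≠ PySem.List.pyGet? l (i - 1)))) ++ [n])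
    let diffs := (cuts.zip (PySem.List.slice cuts (some 1) none)).map (fun p => p.2 - p.1)
    match diffs with
    | [] => 0
    | x :: xs => xs.foldl min x

-- ===== PRECONDITION & SPEC =====
def Spec_min_block (tekst : String) (out : Int) : Prop := out = min_block_alt tekst
instance (tekst : String) (out : Int) : Decidable (Spec_min_block tekst out) := by unfold Spec_min_block; infer_instance

-- ===== CLAIM (what is proved, stated in full; the proofs are below) =====
def Claim_equal_min_block : Prop := ∀ (tekst : String), Dom_min_block tekst → Spec_min_block tekst (min_block tekst)

-- ===== LEMMAS AND PROOFS =====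

-- the list of maximal-run lengths of c^n ++ rest (proof-only intermediate)
def pvRuns (c : Char) (n : Int) : List Char → List Int
  | [] => [n]
  | d :: rest => if d = c then pvRuns c (n + 1) rest else n :: pvRuns d 1 rest

-- running minimum over a list, starting from an optional (none = inf) current minimum
def pvMinF (m : Option Int) (l : List Int) : Option Int :=
  List.foldl (fun acc x => if pvLtInf x acc then some x else acc) m l

-- strict partial sums starting from a (excluding a itself)
def pvPsums (a : Int) : List Int → List Int
  | [] => []
  | x :: xs => (a + x) :: pvPsums (a + x) xs

theorem pvRuns_ne_nil (l : List Char) (c : Char) (n : Int) : pvRuns c n l ≠ [] := by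
  induction l generalizing c n with
  | nil => simp [pvRuns]
  | cons d rest ih => simp only [pvRuns]; split <;> simp [ih]

-- A's loop plus the final `if current_len < min_len` computes the running minimum over the run lengths
theorem foldA_eq_minF (rest : List Char) (c : Char) (n : Int) (m : Option Int) :
    (if pvLtInf (List.foldl pvStepA (m, c, n) rest).2.2 (List.foldl pvStepA (m, c, n) rest).1
      then some (List.foldl pvStepA (m, c, n) rest).2.2 else (List.foldl pvStepA (m, c, n) rest).1)
    = pvMinF m (pvRuns c n rest) := by
  induction rest generalizing c n m with
  | nil => simp [pvMinF, pvRuns, List.foldl]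
  | cons d rest ih =>
    by_cases h : d = c
    · have h1 : pvStepA (m, c, n) d = (m, c, n + 1) := by simp [pvStepA, h]
      have h2 : pvRuns c n (d :: rest) = pvRuns c (n + 1) rest := by simp [pvRuns, h]
      rw [List.foldl_cons, h1, h2]; exact ih c (n + 1) m
    · have h1 : pvStepA (m, c, n) d = ((if pvLtInf n m then some n else m), d, 1) := by
        simp [pvStepA, h]
      have h2 : pvRuns c n (d :: rest) = n :: pvRuns d 1 rest := by simp [pvRuns, h]
      have h3 : pvMinF m (n :: pvRuns d 1 rest)
          = pvMinF (if pvLtInf n m then some n else m) (pvRuns d 1 rest) := rfl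
      rw [List.foldl_cons, h1, h2, h3]; exact ih d 1 _

theorem minF_some (xs : List Int) (a : Int) :
    pvMinF (some a) xs = some (List.foldl min a xs) := by
  induction xs generalizing a with
  | nil => rfl
  | cons x xs ih =>
    by_cases h : x < a
    · have h1 : pvMinF (some a) (x :: xs) = pvMinF (some x) xs := by
        simp [pvMinF, pvLtInf, h]
      rw [h1, List.foldl_cons, ih, min_eq_right h.le]
    · have h1 : pvMinF (some a) (x :: xs) = pvMinF (some a) xs := by
        simp [pvMinF, pvLtInf, h]
      rw [h1, List.foldl_cons, ih, min_eq_left (not_lt.mp h)]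

-- consecutive differences of a :: partial-sums recover the list
theorem diffs_psums (xs : List Int) (a : Int) :
    ((a :: pvPsums a xs).zip (pvPsums a xs)).map (fun p => p.2 - p.1) = xs := by
  induction xs generalizing a with
  | nil => rfl
  | cons x xs ih =>
    simp only [pvPsums, List.zip_cons_cons, List.map_cons, add_sub_cancel_left]
    rw [ih (a + x)]

-- shifting a unit from the pending run length into the start offset
theorem psums_runs_shift (xs : List Char) (c : Char) (n s : Int) :
    pvPsums s (pvRuns c (n + 1) xs) = pvPsums (s + 1) (pvRuns c n xs) := by
  induction xs generalizing c n s with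
  | nil => simp [pvRuns, pvPsums]; ring
  | cons d xs ih =>
    by_cases h : d = c
    · simp only [pvRuns, if_pos h]
      exact ih c (n + 1) s
    · simp only [pvRuns, if_neg h, pvPsums]
      have h2 : s + (n + 1) = s + 1 + n := by ring
      rw [h2]

-- the filtered boundary indices (plus the final n) are the partial sums of the run lengths
theorem cuts_eq_psums (rest : List Char) (pre : List Char) (c : Char) :
    ((PySem.List.pyRange ((pre.length : Int) + 1) (((pre ++ c :: rest).length : Int)) 1).filter
        (fun i => decide (PySem.List.pyGet? (pre ++ c :: rest) i ≠ PySem.List.pyGet? (pre ++ c :: rest) (i - 1))))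
      ++ [((pre ++ c :: rest).length : Int)]
    = pvPsums (pre.length : Int) (pvRuns c 1 rest) := by
  induction rest generalizing pre c with
  | nil =>
    have h : PySem.List.pyRange ((pre.length : Int) + 1) (((pre ++ [c]).length : Int)) 1 = [] := by
      apply PySem.List.pyRange_one_eq_nil
      simp
    rw [h]
    simp [pvRuns, pvPsums]
  | cons d rest ih =>
    have hL : ((pre ++ c :: d :: rest).length : Int) = (pre.length : Int) + 2 + rest.length := by
      simp; ring
    have hlt : (pre.length : Int) + 1 < ((pre ++ c :: d :: rest).length : Int) := by
      rw [hL]; have : (0:Int) ≤ rest.length := Int.natCast_nonneg _; omega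
    rw [PySem.List.pyRange_one_cons hlt, List.filter_cons]
    have hget0 : PySem.List.pyGet? (pre ++ c :: d :: rest) ((pre.length : Int) + 1 - 1)
        = some c := by
      simp only [add_sub_cancel_right]
      exact PySem.List.pyGet?_append_length _ _ _
    have hget1 : PySem.List.pyGet? (pre ++ c :: d :: rest) ((pre.length : Int) + 1)
        = some d := by
      have h1 : pre ++ c :: d :: rest = (pre ++ [c]) ++ d :: rest := by simp
      have h2 : ((pre ++ [c]).length : Int) = (pre.length : Int) + 1 := by simp
      rw [h1, ← h2]
      exact PySem.List.pyGet?_append_length _ _ _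
    have hIH := ih (pre ++ [c]) d
    have hpre1 : ((pre ++ [c]).length : Int) = (pre.length : Int) + 1 := by simp
    have hLens : ((pre ++ [c]) ++ d :: rest) = pre ++ c :: d :: rest := by simp
    rw [hpre1, hLens] at hIH
    by_cases h : d = c
    · have hp : (decide (PySem.List.pyGet? (pre ++ c :: d :: rest) ((pre.length : Int) + 1)
          ≠ PySem.List.pyGet? (pre ++ c :: d :: rest) ((pre.length : Int) + 1 - 1))) = false := by
        rw [hget0, hget1, h]; simp
      rw [h] at hIH
      have hruns : pvRuns c 1 (d :: rest) = pvRuns c (1 + 1) rest := by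
        simp [pvRuns, h]
      rw [hp, if_neg Bool.false_ne_true, hruns,
        psums_runs_shift rest c 1 (pre.length : Int), ← hIH, h]
    · have hp : (decide (PySem.List.pyGet? (pre ++ c :: d :: rest) ((pre.length : Int) + 1)
          ≠ PySem.List.pyGet? (pre ++ c :: d :: rest) ((pre.length : Int) + 1 - 1))) = true := by
        rw [hget0, hget1]; simp [h]
      rw [hp, if_pos rfl]
      have hruns : pvRuns c 1 (d :: rest) = 1 :: pvRuns d 1 rest := by
        simp [pvRuns, h]
      rw [hruns]
      simp only [pvPsums, List.cons_append]
      exact congrArg (List.cons ((pre.length : Int) + 1)) hIH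

-- instantiation wrapper for cuts_eq_psums with the bounds given as equations
theorem cuts_eq_psums' (rest : List Char) (pre : List Char) (c : Char) (L : List Char)
    (s1 N : Int) (hL : L = pre ++ c :: rest) (hs1 : s1 = (pre.length : Int) + 1)
    (hN : N = ((L.length : Int))) :
    ((PySem.List.pyRange s1 N 1).filter
        (fun i => decide (PySem.List.pyGet? L i ≠ PySem.List.pyGet? L (i - 1)))) ++ [N]
    = pvPsums (pre.length : Int) (pvRuns c 1 rest) := by
  subst hL; subst hs1; subst hN
  exact cuts_eq_psums rest pre c

-- ===== VERDICT (by name: the statement is the Claim_ definition above) =====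
theorem min_block_spec : Claim_equal_min_block := by
  intro tekst _
  unfold Spec_min_block min_block min_block_alt
  cases htl : tekst.toList with
  | nil => rfl
  | cons c rest =>
    simp only
    have hne : ((c :: rest).length : Int) ≠ 0 := by
      simp only [List.length_cons]; push_cast; omega
    rw [if_neg hne]
    rw [cuts_eq_psums' rest [] c (c :: rest) 1 ((c :: rest).length : Int)
      (by simp) (by simp) rfl]
    simp only [List.length_nil, Int.natCast_zero]
    rw [PySem.List.slice_from_one]
    simp only [List.tail_cons]
    rw [diffs_psums (pvRuns c 1 rest) 0]
    rw [foldA_eq_minF]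
    cases hr : pvRuns c 1 rest with
    | nil => exact absurd hr (pvRuns_ne_nil rest c 1)
    | cons x xs =>
      have h0 : pvMinF none (x :: xs) = pvMinF (some x) xs := by
        simp [pvMinF, pvLtInf]
      rw [h0, minF_some]
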